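-- pv_equiv track=rewrite | github.com/luffycodes/Tutorbot-Spock | src/train/train_sft.py | get_assistant_start_end_indices
-- ===== SOURCE A (Python) =====
-- def get_assistant_start_end_indices(messages, conversation_text):
--     start_indices = []
--     current_index = 0
--     for message in messages:
--         message_text = message["content"]
--         match_index = conversation_text[current_index:].find(message_text)
--         start_indices.append(current_index + match_index)
--         current_index += match_index + len(message_text)
--     end_indices = [len(conversation_text) if i == len(start_indices) - 1 else start_indices[i+1] for i, x in enumerate(start_indices)]
--     roles = [message["role"] for message in messages]
--     return [(s, e) for s, e, r in zip(start_indices, end_indices, roles) if r == "Tutorbot"]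
-- ===== SOURCE B (Python) =====
-- def get_assistant_start_end_indices(messages, conversation_text):
--     result = []
--     pointer = 0
--     prev = None  # (start, role) of the previous message
--     for message in messages:
--         message_text = message["content"]
--         start = pointer + conversation_text[pointer:].find(message_text)
--         if prev is not None and prev[1] == "Tutorbot":
--             result.append((prev[0], start))
--         prev = (start, message["role"])
--         pointer = start + len(message_text)
--     if prev is not None and prev[1] == "Tutorbot":
--         result.append((prev[0], len(conversation_text)))
--     return result
-- ===== Notes on version B (the rewrite author's own statement) =====
-- stated objective: simpler
-- what changed: Replaces A's four sequential passes (start-index loop, end-index comprehension with indexing, roles list, zip-filter) by a single streaming loop that carries a forward pointer and the previous message's (start, role), emitting each Tutorbot span as soon as the next start is known.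
import Mathlib
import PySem

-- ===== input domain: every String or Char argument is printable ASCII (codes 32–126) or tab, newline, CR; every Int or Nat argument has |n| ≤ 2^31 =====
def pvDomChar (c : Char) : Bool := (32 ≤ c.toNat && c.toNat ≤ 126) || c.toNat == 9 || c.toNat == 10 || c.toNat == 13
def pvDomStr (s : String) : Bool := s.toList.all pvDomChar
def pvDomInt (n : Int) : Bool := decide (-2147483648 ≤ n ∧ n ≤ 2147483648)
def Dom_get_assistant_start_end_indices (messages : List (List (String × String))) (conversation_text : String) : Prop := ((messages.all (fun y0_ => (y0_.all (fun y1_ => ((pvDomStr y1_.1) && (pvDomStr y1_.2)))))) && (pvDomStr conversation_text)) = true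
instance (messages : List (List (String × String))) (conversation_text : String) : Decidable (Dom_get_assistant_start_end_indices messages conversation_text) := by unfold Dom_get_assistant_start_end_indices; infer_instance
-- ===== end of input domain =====

-- B replaces A's four passes (start loop, end comprehension, roles list, zip-filter) by one
-- streaming loop that carries the previous message's (start, role); same return value (no speed claim).

-- ===== PORT A =====
-- the loop building start_indices (current_index threaded through; .getD "" is a totalization
-- guard: Pre_ guarantees the "content" key is present, as Python raises KeyError otherwise)
def aStarts (text : String) (messages : List (List (String × String))) (cur : Int) : List Int :=
  match messages with
  | [] => []
  | m :: rest =>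
    let mt := (List.lookup "content" m).getD ""
    let mi := PySem.Str.find (PySem.Str.slice text (some cur) none) mt
    (cur + mi) :: aStarts text rest (cur + mi + PySem.Str.len mt)

def get_assistant_start_end_indices (messages : List (List (String × String))) (conversation_text : String) : List (Int × Int) :=
  let starts := aStarts conversation_text messages 0
  -- end_indices comprehension; start_indices[i+1] is always in range here, the pyGetD default 0 is never read
  let ends := (PySem.List.enumerate starts).map (fun p =>
    if p.1 = (starts.length : Int) - 1 then PySem.Str.len conversation_text
    else PySem.List.pyGetD starts (p.1 + 1) 0)
  let roles := messages.map (fun m => (List.lookup "role" m).getD "")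
  (starts.zip (ends.zip roles)).filterMap (fun p =>
    if p.2.2 = "Tutorbot" then some (p.1, p.2.1) else none)

-- ===== PORT B =====
-- one pass: pointer plus the previous message's (start, role); emission order preserved
def bLoop (text : String) (messages : List (List (String × String))) (cur : Int) (prev : Option (Int × String)) : List (Int × Int) :=
  match messages with
  | [] =>
    match prev with
    | some pr => if pr.2 = "Tutorbot" then [(pr.1, PySem.Str.len text)] else []
    | none => []
  | m :: rest =>
    let mt := (List.lookup "content" m).getD ""
    let start := cur + PySem.Str.find (PySem.Str.slice text (some cur) none) mt
    let tail := bLoop text rest (start + PySem.Str.len mt) (some (start, (List.lookup "role" m).getD ""))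
    match prev with
    | some pr => if pr.2 = "Tutorbot" then (pr.1, start) :: tail else tail
    | none => tail

def get_assistant_start_end_indices_alt (messages : List (List (String × String))) (conversation_text : String) : List (Int × Int) :=
  bLoop conversation_text messages 0 none

-- ===== PRECONDITION & SPEC =====
-- Pre_ excludes exactly the inputs where Python A raises KeyError: a message missing "content" or "role"
def Pre_get_assistant_start_end_indices (messages : List (List (String × String))) (conversation_text : String) : Prop :=
  ∀ m ∈ messages, (List.lookup "content" m).isSome = true ∧ (List.lookup "role" m).isSome = true
instance (messages : List (List (String × String))) (conversation_text : String) : Decidable (Pre_get_assistant_start_end_indices messages conversation_text) := by unfold Pre_get_assistant_start_end_indices; infer_instance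
def pvWitness_get_assistant_start_end_indices : (List (List (String × String))) × String :=
  ([[("content", "hi"), ("role", "Tutorbot")], [("content", "yo"), ("role", "Student")]], "hi yo")

def Spec_get_assistant_start_end_indices (messages : List (List (String × String))) (conversation_text : String) (out : List (Int × Int)) : Prop := out = get_assistant_start_end_indices_alt messages conversation_text
instance (messages : List (List (String × String))) (conversation_text : String) (out : List (Int × Int)) : Decidable (Spec_get_assistant_start_end_indices messages conversation_text out) := by unfold Spec_get_assistant_start_end_indices; infer_instance

-- ===== CLAIM (what is proved, stated in full; the proofs are below) =====
def Claim_equal_get_assistant_start_end_indices : Prop := ∀ (messages : List (List (String × String))) (conversation_text : String), Dom_get_assistant_start_end_indices messages conversation_text → Pre_get_assistant_start_end_indices messages conversation_text → Spec_get_assistant_start_end_indices messages conversation_text (get_assistant_start_end_indices messages conversation_text)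

-- ===== LEMMAS AND PROOFS =====

-- abbreviations for the shared step computations (proof-side only)
def sStep (text : String) (cur : Int) (m : List (String × String)) : Int :=
  cur + PySem.Str.find (PySem.Str.slice text (some cur) none) ((List.lookup "content" m).getD "")
def contLen (m : List (String × String)) : Int := PySem.Str.len ((List.lookup "content" m).getD "")
def roleD (m : List (String × String)) : String := (List.lookup "role" m).getD ""

theorem aStarts_cons (text : String) (m : List (String × String)) (rest : List (List (String × String))) (cur : Int) :
    aStarts text (m :: rest) cur = sStep text cur m :: aStarts text rest (sStep text cur m + contLen m) := rfl

theorem bLoop_cons_none (text : String) (m : List (String × String)) (rest : List (List (String × String))) (cur : Int) :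
    bLoop text (m :: rest) cur none = bLoop text rest (sStep text cur m + contLen m) (some (sStep text cur m, roleD m)) := rfl

-- the end index A pairs with the previous message: the next message's start, or len(text) at the end
def firstEnd (text : String) (messages : List (List (String × String))) (cur : Int) : Int :=
  match messages with
  | [] => PySem.Str.len text
  | m :: _ => sStep text cur m

-- B's loop with a pending previous message = emit its pair (ending at firstEnd) then run with none
theorem bLoop_some (text : String) (messages : List (List (String × String))) (cur p : Int) (r : String) :
    bLoop text messages cur (some (p, r)) =
      (if r = "Tutorbot" then [(p, firstEnd text messages cur)] else []) ++ bLoop text messages cur none := by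
  cases messages with
  | nil => by_cases h : r = "Tutorbot" <;> simp [bLoop, firstEnd, h]
  | cons m rest =>
    by_cases h : r = "Tutorbot" <;>
      simp only [bLoop, firstEnd, sStep, h, if_pos, if_neg, not_false_iff, List.singleton_append,
        List.nil_append]

-- A's end_indices comprehension, characterised: drop the first start, append len(text) (if any)
theorem ends_char (L : Int) (l : List Int) :
    (PySem.List.enumerate l).map (fun p =>
        if p.1 = (l.length : Int) - 1 then L else PySem.List.pyGetD l (p.1 + 1) 0) =
      l.drop 1 ++ (if l.isEmpty then [] else [L]) := by
  apply List.ext_getElem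
  · cases l <;> simp [PySem.List.length_enumerate]
  · intro i h1 h2
    simp only [List.getElem_map, PySem.List.getElem_enumerate, zero_add]
    have hlen : i < l.length := by simpa [PySem.List.length_enumerate] using (by simpa using h1)
    by_cases hi : i = l.length - 1
    · have hne : ¬ l.isEmpty := by cases l <;> simp_all
      have heq : ((i : Int) = (l.length : Int) - 1) := by omega
      simp only [heq, if_pos, hne]
      rw [List.getElem_append_right (by simp; omega)]
      simp [hi]
    · have hlt : i < l.length - 1 := by omega
      have hne : ¬ ((i : Int) = (l.length : Int) - 1) := by omega
      simp only [hne, if_neg, not_false_iff]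
      rw [List.getElem_append_left (by simp; omega)]
      rw [show ((i : Int) + 1) = ((i + 1 : Nat) : Int) by push_cast; ring, PySem.List.pyGetD_natCast]
      rw [List.getD_eq_getElem l 0 (show i + 1 < l.length by omega), List.getElem_drop]
      congr 1
      omega

-- the zip-filter over starts/(drop 1 ++ [L])/roles IS B's loop started with no pending message
theorem main_loop (text : String) (messages : List (List (String × String))) (cur : Int) :
    ((aStarts text messages cur).zip
        (((aStarts text messages cur).drop 1 ++
            (if (aStarts text messages cur).isEmpty then [] else [PySem.Str.len text])).zip
          (messages.map (fun m => (List.lookup "role" m).getD "")))).filterMap (fun p =>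
        if p.2.2 = "Tutorbot" then some (p.1, p.2.1) else none) =
      bLoop text messages cur none := by
  induction messages generalizing cur with
  | nil => simp [aStarts, bLoop]
  | cons m rest ih =>
    rw [bLoop_cons_none, bLoop_some, aStarts_cons]
    cases rest with
    | nil =>
      by_cases h : (List.lookup "role" m).getD "" = "Tutorbot" <;>
        simp [aStarts, bLoop, firstEnd, roleD, sStep, h]
    | cons m' rest' =>
      rw [aStarts_cons text m' rest']
      simp only [List.isEmpty_cons, List.drop_succ_cons, List.drop_zero, List.map_cons,
        Bool.false_eq_true, if_false, firstEnd]
      rw [← aStarts_cons text m' rest', ← ih]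
      by_cases h : (List.lookup "role" m).getD "" = "Tutorbot" <;>
        simp [roleD, sStep, h, aStarts_cons]

-- ===== VERDICT (by name: the statement is the Claim_ definition above) =====
theorem get_assistant_start_end_indices_spec : Claim_equal_get_assistant_start_end_indices := by
  intro messages conversation_text _ _
  unfold Spec_get_assistant_start_end_indices
  simp only [get_assistant_start_end_indices, get_assistant_start_end_indices_alt]
  rw [ends_char]
  exact main_loop conversation_text messages 0
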